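-- pv_equiv track=rewrite | github.com/JayeBlack/basics_backend | list comprehension.py | exclusive_products
-- ===== SOURCE A (Python) =====
-- def exclusive_products(inventory1, inventory2):
--     # implement this
--     set1, set2 = set(inventory1), set(inventory2)
--     set1 = {item.upper() for item in set1}
--     set2 = {item.upper() for item in set2}
--     result1 = set1 - set2
--     result2 = set2 - set1
--     result1 = sorted(list(result1))
--     result2 = sorted(list(result2))
--     return result1, result2
-- ===== SOURCE B (Python) =====
-- def exclusive_products(inventory1, inventory2):
--     # One combined tagged index: key -> [seen in inventory1, seen in inventory2],
--     # then a single classification pass, instead of two set differences.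
--     flags = {}
--     for item in inventory1:
--         flags.setdefault(item.upper(), [False, False])[0] = True
--     for item in inventory2:
--         flags.setdefault(item.upper(), [False, False])[1] = True
--     only1, only2 = [], []
--     for key, (in1, in2) in flags.items():
--         if in1 and not in2:
--             only1.append(key)
--         elif in2 and not in1:
--             only2.append(key)
--     return sorted(only1), sorted(only2)
-- ===== Notes on version B (the rewrite author's own statement) =====
-- stated objective: alternative
-- what changed: Replaces the two set-difference computations with one dict mapping each uppercased item to a pair of membership flags, built in two tagging passes and partitioned into the two result lists in a single classification pass.
import Mathlib
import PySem

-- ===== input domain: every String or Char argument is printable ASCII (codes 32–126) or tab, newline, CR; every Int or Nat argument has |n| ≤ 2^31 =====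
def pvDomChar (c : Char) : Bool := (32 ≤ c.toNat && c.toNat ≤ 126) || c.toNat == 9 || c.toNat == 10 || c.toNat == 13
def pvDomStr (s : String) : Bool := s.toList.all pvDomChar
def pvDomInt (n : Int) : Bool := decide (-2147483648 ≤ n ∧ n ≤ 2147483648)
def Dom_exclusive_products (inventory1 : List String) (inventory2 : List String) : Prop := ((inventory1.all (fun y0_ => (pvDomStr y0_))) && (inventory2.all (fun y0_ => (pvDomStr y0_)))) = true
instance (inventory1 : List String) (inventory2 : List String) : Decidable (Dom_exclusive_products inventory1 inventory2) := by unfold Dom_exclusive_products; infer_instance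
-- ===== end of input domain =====

-- B replaces A's two set differences by one dict of membership-flag pairs built in
-- two tagging passes and partitioned in a single classification pass (alternative decomposition).


-- ===== PORT A =====
def exclusive_products (inventory1 : List String) (inventory2 : List String) : List String × List String :=
  let set1 := PySem.Set.ofList inventory1
  let set2 := PySem.Set.ofList inventory2
  let set1u := PySem.Set.ofList (set1.map PySem.Str.upper)
  let set2u := PySem.Set.ofList (set2.map PySem.Str.upper)
  let result1 := PySem.Set.diff set1u set2u
  let result2 := PySem.Set.diff set2u set1u
  (PySem.List.sorted result1 (fun x => x) false, PySem.List.sorted result2 (fun x => x) false)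

-- ===== PORT B =====
-- flags.setdefault(item.upper(), [False, False])[0] = True
def epTag1 (d : PySem.Dict String (Bool × Bool)) (item : String) : PySem.Dict String (Bool × Bool) :=
  let k := PySem.Str.upper item
  d.insert k (true, (d.getD k (false, false)).2)

-- flags.setdefault(item.upper(), [False, False])[1] = True
def epTag2 (d : PySem.Dict String (Bool × Bool)) (item : String) : PySem.Dict String (Bool × Bool) :=
  let k := PySem.Str.upper item
  d.insert k ((d.getD k (false, false)).1, true)

-- the classification-loop body
def epClassify (acc : List String × List String) (kv : String × (Bool × Bool)) : List String × List String :=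
  if kv.2.1 && !kv.2.2 then (acc.1 ++ [kv.1], acc.2)
  else if kv.2.2 && !kv.2.1 then (acc.1, acc.2 ++ [kv.1])
  else acc

def exclusive_products_alt (inventory1 : List String) (inventory2 : List String) : List String × List String :=
  let flags := inventory2.foldl epTag2 (inventory1.foldl epTag1 PySem.Dict.empty)
  let r := flags.items.foldl epClassify ([], [])
  (PySem.List.sorted r.1 (fun x => x) false, PySem.List.sorted r.2 (fun x => x) false)

-- ===== PRECONDITION & SPEC =====
def Spec_exclusive_products (inventory1 : List String) (inventory2 : List String) (out : List String × List String) : Prop := out = exclusive_products_alt inventory1 inventory2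
instance (inventory1 : List String) (inventory2 : List String) (out : List String × List String) : Decidable (Spec_exclusive_products inventory1 inventory2 out) := by unfold Spec_exclusive_products; infer_instance

-- ===== CLAIM (what is proved, stated in full; the proofs are below) =====
def Claim_equal_exclusive_products : Prop := ∀ (inventory1 : List String) (inventory2 : List String), Dom_exclusive_products inventory1 inventory2 → Spec_exclusive_products inventory1 inventory2 (exclusive_products inventory1 inventory2)

-- ===== LEMMAS AND PROOFS =====

theorem getD_foldl_epTag1 (l : List String) (d : PySem.Dict String (Bool × Bool)) (k : String) :
    (l.foldl epTag1 d).getD k (false, false) =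
      ((decide (k ∈ l.map PySem.Str.upper) || (d.getD k (false, false)).1),
        (d.getD k (false, false)).2) := by
  induction l generalizing d with
  | nil => simp
  | cons a t ih =>
      simp only [List.foldl_cons, ih, epTag1, List.map_cons, List.mem_cons]
      rw [PySem.Dict.getD_insert]
      by_cases h : k = PySem.Str.upper a <;> simp [h]

theorem getD_foldl_epTag2 (l : List String) (d : PySem.Dict String (Bool × Bool)) (k : String) :
    (l.foldl epTag2 d).getD k (false, false) =
      ((d.getD k (false, false)).1,
        (decide (k ∈ l.map PySem.Str.upper) || (d.getD k (false, false)).2)) := by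
  induction l generalizing d with
  | nil => simp
  | cons a t ih =>
      simp only [List.foldl_cons, ih, epTag2, List.map_cons, List.mem_cons]
      rw [PySem.Dict.getD_insert]
      by_cases h : k = PySem.Str.upper a <;> simp [h]

theorem mem_keys_foldl_epTag1 (l : List String) (d : PySem.Dict String (Bool × Bool)) (k : String) :
    k ∈ (l.foldl epTag1 d).keys ↔ k ∈ l.map PySem.Str.upper ∨ k ∈ d.keys := by
  induction l generalizing d with
  | nil => simp
  | cons a t ih =>
      simp only [List.foldl_cons, ih, epTag1, List.map_cons, List.mem_cons,
        PySem.Dict.mem_keys_insert]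
      tauto

theorem mem_keys_foldl_epTag2 (l : List String) (d : PySem.Dict String (Bool × Bool)) (k : String) :
    k ∈ (l.foldl epTag2 d).keys ↔ k ∈ l.map PySem.Str.upper ∨ k ∈ d.keys := by
  induction l generalizing d with
  | nil => simp
  | cons a t ih =>
      simp only [List.foldl_cons, ih, epTag2, List.map_cons, List.mem_cons,
        PySem.Dict.mem_keys_insert]
      tauto

theorem nodup_keys_foldl_epTag1 (l : List String) (d : PySem.Dict String (Bool × Bool))
    (h : d.keys.Nodup) : (l.foldl epTag1 d).keys.Nodup := by
  induction l generalizing d with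
  | nil => exact h
  | cons a t ih => exact ih _ (PySem.Dict.nodup_keys_insert _ _ _ h)

theorem nodup_keys_foldl_epTag2 (l : List String) (d : PySem.Dict String (Bool × Bool))
    (h : d.keys.Nodup) : (l.foldl epTag2 d).keys.Nodup := by
  induction l generalizing d with
  | nil => exact h
  | cons a t ih => exact ih _ (PySem.Dict.nodup_keys_insert _ _ _ h)

theorem foldl_epClassify (l : List (String × (Bool × Bool))) (acc : List String × List String) :
    l.foldl epClassify acc =
      (acc.1 ++ (l.filter (fun kv => kv.2.1 && !kv.2.2)).map (·.1),
        acc.2 ++ (l.filter (fun kv => kv.2.2 && !kv.2.1)).map (·.1)) := by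
  induction l generalizing acc with
  | nil => simp
  | cons a t ih =>
      simp only [List.foldl_cons, ih, List.filter_cons]
      rcases acc with ⟨a1, a2⟩
      by_cases h1 : a.2.1 = true <;> by_cases h2 : a.2.2 = true <;>
        simp [epClassify, h1, h2]

-- the final flags dict, named for the proofs
def epFlags (inventory1 : List String) (inventory2 : List String) : PySem.Dict String (Bool × Bool) :=
  inventory2.foldl epTag2 (inventory1.foldl epTag1 PySem.Dict.empty)

theorem epFlags_nodup (inventory1 inventory2 : List String) :
    (epFlags inventory1 inventory2).keys.Nodup :=
  nodup_keys_foldl_epTag2 _ _ (nodup_keys_foldl_epTag1 _ _ (by simp [PySem.Dict.keys_empty]))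

theorem epFlags_getD (inventory1 inventory2 : List String) (k : String) :
    (epFlags inventory1 inventory2).getD k (false, false) =
      (decide (k ∈ inventory1.map PySem.Str.upper), decide (k ∈ inventory2.map PySem.Str.upper)) := by
  simp [epFlags, getD_foldl_epTag2, getD_foldl_epTag1]

theorem epFlags_mem_keys (inventory1 inventory2 : List String) (k : String) :
    k ∈ (epFlags inventory1 inventory2).keys ↔
      k ∈ inventory1.map PySem.Str.upper ∨ k ∈ inventory2.map PySem.Str.upper := by
  simp only [epFlags, mem_keys_foldl_epTag2, mem_keys_foldl_epTag1, PySem.Dict.keys_empty,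
    List.not_mem_nil, or_false]
  exact Or.comm

-- membership of k in the filtered-items key list ↔ the flag pair at k passes p
theorem mem_filter_items (inventory1 inventory2 : List String) (p : String × (Bool × Bool) → Bool)
    (k : String) :
    k ∈ (((epFlags inventory1 inventory2).items.filter p).map (·.1)) ↔
      k ∈ (epFlags inventory1 inventory2).keys ∧
        p (k, (epFlags inventory1 inventory2).getD k (false, false)) = true := by
  constructor
  · rintro h
    simp only [List.mem_map, List.mem_filter] at h
    obtain ⟨⟨k', v⟩, ⟨hmem, hp⟩, hk⟩ := h
    subst hk
    have hget := PySem.Dict.get?_of_mem_items _ hmem (epFlags_nodup inventory1 inventory2)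
    have hD := PySem.Dict.getD_of_get?_eq_some _ (false, false) hget
    exact ⟨PySem.Dict.mem_keys_of_mem_items _ hmem, by rw [hD]; exact hp⟩
  · rintro ⟨hk, hp⟩
    have hne : (epFlags inventory1 inventory2).get? k ≠ none := by
      rw [Ne, PySem.Dict.get?_eq_none_iff_not_mem_keys]; simp [hk]
    obtain ⟨v, hv⟩ := Option.ne_none_iff_exists'.mp hne
    have hD := PySem.Dict.getD_of_get?_eq_some _ (false, false) hv
    have hmem := PySem.Dict.mem_items_of_get?_eq_some _ hv
    simp only [List.mem_map, List.mem_filter]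
    exact ⟨(k, v), ⟨hmem, by rw [hD] at hp; exact hp⟩, rfl⟩

theorem mem_upper_set (inv : List String) (k : String) :
    k ∈ (PySem.Set.ofList ((PySem.Set.ofList inv).map PySem.Str.upper)) ↔
      k ∈ inv.map PySem.Str.upper := by
  simp only [PySem.Set.mem_ofList, List.mem_map]

theorem exclusive_side1 (inventory1 inventory2 : List String) :
    PySem.List.sorted
      (PySem.Set.diff
        (PySem.Set.ofList ((PySem.Set.ofList inventory1).map PySem.Str.upper))
        (PySem.Set.ofList ((PySem.Set.ofList inventory2).map PySem.Str.upper)))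
      (fun x => x) false =
    PySem.List.sorted
      (((epFlags inventory1 inventory2).items.filter (fun kv => kv.2.1 && !kv.2.2)).map (·.1))
      (fun x => x) false := by
  apply PySem.List.sorted_eq_sorted_of_perm _ _ _ (fun a b h => h)
  apply (List.perm_ext_iff_of_nodup
    (PySem.Set.nodup_diff _ _ (PySem.Set.nodup_ofList _))
    (((List.filter_sublist).map (fun x : String × (Bool × Bool) => x.1)).nodup
      (by simpa only [PySem.Dict.keys] using epFlags_nodup inventory1 inventory2))).mpr
  intro k
  rw [PySem.Set.mem_diff, mem_upper_set, mem_upper_set,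
    mem_filter_items, epFlags_mem_keys, epFlags_getD]
  by_cases h1 : k ∈ inventory1.map PySem.Str.upper <;>
    by_cases h2 : k ∈ inventory2.map PySem.Str.upper <;> simp [h1, h2]

theorem exclusive_side2 (inventory1 inventory2 : List String) :
    PySem.List.sorted
      (PySem.Set.diff
        (PySem.Set.ofList ((PySem.Set.ofList inventory2).map PySem.Str.upper))
        (PySem.Set.ofList ((PySem.Set.ofList inventory1).map PySem.Str.upper)))
      (fun x => x) false =
    PySem.List.sorted
      (((epFlags inventory1 inventory2).items.filter (fun kv => kv.2.2 && !kv.2.1)).map (·.1))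
      (fun x => x) false := by
  apply PySem.List.sorted_eq_sorted_of_perm _ _ _ (fun a b h => h)
  apply (List.perm_ext_iff_of_nodup
    (PySem.Set.nodup_diff _ _ (PySem.Set.nodup_ofList _))
    (((List.filter_sublist).map (fun x : String × (Bool × Bool) => x.1)).nodup
      (by simpa only [PySem.Dict.keys] using epFlags_nodup inventory1 inventory2))).mpr
  intro k
  rw [PySem.Set.mem_diff, mem_upper_set, mem_upper_set,
    mem_filter_items, epFlags_mem_keys, epFlags_getD]
  by_cases h1 : k ∈ inventory1.map PySem.Str.upper <;>
    by_cases h2 : k ∈ inventory2.map PySem.Str.upper <;> simp [h1, h2]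

-- ===== VERDICT (by name: the statement is the Claim_ definition above) =====
theorem exclusive_products_spec : Claim_equal_exclusive_products := by
  intro inventory1 inventory2 _
  show _ = _
  unfold exclusive_products exclusive_products_alt
  simp only [foldl_epClassify, List.nil_append]
  exact Prod.ext (exclusive_side1 inventory1 inventory2) (exclusive_side2 inventory1 inventory2)
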